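-- pv_equiv track=rewrite | github.com/Vallirian/The-Data-Workspace | api/helpers/arc_utils.py | reorder_query
-- ===== SOURCE A (Python) =====
-- def reorder_query(queries: list[tuple[str, str]]) -> list[tuple[str, str]]:
--     """
--     Reorder the query to ensure that the column table is created first.
--
--     1. Data definition language (DDL) statements (https://dev.mysql.com/doc/refman/8.4/en/implicit-commit.html)
--         - have an implicit commit, which means that they are committed even if the transaction involves multiple statements.
--         So, we run non-DDL statements first, then DDL statements to avoid committing the transaction before all statements are run.
--
--     Args:
--         queries (list[tuple[str, str]]): List of queries to reorder. Each query is a tuple of the query and the query parameters.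
--
--     Returns:
--         list[tuple[str, str]]: Reordered queries. Each query is a tuple of the query and the query parameters.
--     """
--     ddl_statement_prefixes = ['ALTER', 'CREATE', 'DROP', 'INSTALL', 'RENAME', 'TRUNCATE', 'UNINSTALL']
--     ddl_queries = []
--     non_ddl_queries = []
--
--     for query in queries:
--         part = query[0]
--         if part.strip() == '':
--             continue
--         if any(part.strip().startswith(prefix) for prefix in ddl_statement_prefixes):
--             ddl_queries.append(query)
--         else:
--             non_ddl_queries.append(query)
--
--     return non_ddl_queries + ddl_queries
-- ===== SOURCE B (Python) =====
-- def reorder_query(queries: list[tuple[str, str]]) -> list[tuple[str, str]]: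
--     """Run non-DDL statements first, then DDL statements (stable order)."""
--     ddl_statement_prefixes = ('ALTER', 'CREATE', 'DROP', 'INSTALL', 'RENAME', 'TRUNCATE', 'UNINSTALL')
--
--     def is_ddl(query):
--         return query[0].strip().startswith(ddl_statement_prefixes)
--
--     filtered = [q for q in queries if q[0].strip() != '']
--     return sorted(filtered, key=is_ddl)
-- ===== Notes on version B (the rewrite author's own statement) =====
-- stated objective: idiomatic
-- what changed: Replaces the explicit two-bucket partition loop with a blank-dropping filter followed by a stable sort on a boolean is-DDL key (non-DDL before DDL, original order preserved by stability).
import Mathlib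
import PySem

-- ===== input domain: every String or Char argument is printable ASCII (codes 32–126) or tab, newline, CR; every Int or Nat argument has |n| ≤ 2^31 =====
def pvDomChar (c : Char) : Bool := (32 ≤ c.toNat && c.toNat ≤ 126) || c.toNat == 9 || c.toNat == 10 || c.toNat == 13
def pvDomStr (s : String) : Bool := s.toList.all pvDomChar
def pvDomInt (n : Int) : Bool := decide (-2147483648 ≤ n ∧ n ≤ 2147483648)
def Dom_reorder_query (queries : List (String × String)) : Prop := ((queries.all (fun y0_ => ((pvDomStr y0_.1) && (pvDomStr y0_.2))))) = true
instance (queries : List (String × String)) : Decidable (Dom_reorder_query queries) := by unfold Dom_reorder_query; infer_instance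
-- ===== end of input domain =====

-- B replaces A's explicit two-bucket partition with filter-then-stable-sort on a boolean
-- is-DDL key (idiomatic; same result, non-DDL first in original order, then DDL).


-- ===== PORT A =====
def ddlPrefixes : List String :=
  ["ALTER", "CREATE", "DROP", "INSTALL", "RENAME", "TRUNCATE", "UNINSTALL"]

def reorder_query (queries : List (String × String)) : List (String × String) :=
  let st := queries.foldl (fun (acc : List (String × String) × List (String × String)) query =>
    let part := query.1
    if PySem.Str.strip part == "" then acc
    else if ddlPrefixes.any (fun prefix_ => PySem.Str.startswith (PySem.Str.strip part) prefix_) then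
      (acc.1 ++ [query], acc.2)
    else
      (acc.1, acc.2 ++ [query])) ([], [])
  st.2 ++ st.1

-- ===== PORT B =====
-- is_ddl(query): query[0].strip().startswith(tuple of prefixes)
def isDdl (query : String × String) : Bool :=
  ["ALTER", "CREATE", "DROP", "INSTALL", "RENAME", "TRUNCATE", "UNINSTALL"].any
    (fun p => PySem.Str.startswith (PySem.Str.strip query.1) p)

def reorder_query_alt (queries : List (String × String)) : List (String × String) :=
  let filtered := queries.filter (fun q => !(PySem.Str.strip q.1 == ""))
  PySem.List.sorted filtered isDdl

-- ===== PRECONDITION & SPEC =====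
def Spec_reorder_query (queries : List (String × String)) (out : List (String × String)) : Prop := out = reorder_query_alt queries
instance (queries : List (String × String)) (out : List (String × String)) : Decidable (Spec_reorder_query queries out) := by unfold Spec_reorder_query; infer_instance

-- ===== CLAIM (what is proved, stated in full; the proofs are below) =====
def Claim_equal_reorder_query : Prop := ∀ (queries : List (String × String)), Dom_reorder_query queries → Spec_reorder_query queries (reorder_query queries)

-- ===== LEMMAS AND PROOFS =====

-- Inserting an element with key = false into (F ++ T), F all-false, T all-true,
-- lands it right between them (stability of the boolean-key insertion).
theorem insertBy_false_mid {α : Type} (key : α → Bool) (x : α) (hx : key x = false)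
    (F T : List α) (hF : ∀ y ∈ F, key y = false) (hT : ∀ y ∈ T, key y = true) :
    PySem.List.insertBy (fun a b => decide (key a < key b)) x (F ++ T) = F ++ x :: T := by
  induction F with
  | nil =>
    cases T with
    | nil => simp [PySem.List.insertBy]
    | cons y ys =>
      have hy := hT y (by simp)
      simp [PySem.List.insertBy, hx, hy]
  | cons f F' ih =>
    have hf := hF f (by simp)
    simp only [List.cons_append, PySem.List.insertBy]
    rw [if_neg (by simp [Bool.lt_iff, hf])]
    simp only [List.cons.injEq, true_and]
    exact ih (fun y hy => hF y (by simp [hy]))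

-- Stable sort on a boolean key = false-bucket ++ true-bucket, as a foldl invariant.
theorem foldl_insertBy_bool {α : Type} (key : α → Bool) (xs : List α) :
    ∀ (F T : List α), (∀ y ∈ F, key y = false) → (∀ y ∈ T, key y = true) →
    xs.foldl (fun acc x => PySem.List.insertBy (fun a b => decide (key a < key b)) x acc) (F ++ T)
      = (F ++ xs.filter (fun x => !key x)) ++ (T ++ xs.filter key) := by
  induction xs with
  | nil => intro F T _ _; simp
  | cons x xs ih =>
    intro F T hF hT
    cases hx : key x with
    | false =>
      rw [List.foldl_cons, insertBy_false_mid key x hx F T hF hT]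
      have := ih (F ++ [x]) T
        (by intro y hy; rcases List.mem_append.1 hy with h | h
            · exact hF y h
            · simp at h; subst h; exact hx) hT
      simpa [List.filter, hx] using this
    | true =>
      rw [List.foldl_cons,
        PySem.List.insertBy_of_forall_not_before _ x (F ++ T)
          (by intro y hy; simp [Bool.lt_iff, hx])]
      have := ih F (T ++ [x]) hF
        (by intro y hy; rcases List.mem_append.1 hy with h | h
            · exact hT y h
            · simp at h; subst h; exact hx)
      simpa [List.filter, hx] using this

theorem sorted_bool_key {α : Type} (key : α → Bool) (xs : List α) :
    PySem.List.sorted xs key = xs.filter (fun x => !key x) ++ xs.filter key := by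
  rw [PySem.List.sorted_eq_foldl_insertBy]
  simpa using foldl_insertBy_bool key xs [] [] (by simp) (by simp)

-- A's loop, with its two accumulator buckets generalized.
theorem reorder_loop (queries : List (String × String)) :
    ∀ (D N : List (String × String)),
    queries.foldl (fun (acc : List (String × String) × List (String × String)) query =>
      if PySem.Str.strip query.1 == "" then acc
      else if ddlPrefixes.any (fun prefix_ => PySem.Str.startswith (PySem.Str.strip query.1) prefix_) then
        (acc.1 ++ [query], acc.2)
      else
        (acc.1, acc.2 ++ [query])) (D, N)
      = (D ++ (queries.filter (fun q => !(PySem.Str.strip q.1 == ""))).filter isDdl,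
         N ++ (queries.filter (fun q => !(PySem.Str.strip q.1 == ""))).filter (fun q => !isDdl q)) := by
  induction queries with
  | nil => intro D N; simp
  | cons q qs ih =>
    intro D N
    rw [List.foldl_cons]
    by_cases hb : PySem.Str.strip q.1 == ""
    · simp only [hb, if_true, ih, List.filter, Bool.not_true]
    · have hb' : (PySem.Str.strip q.1 == "") = false := by simpa using hb
      by_cases hd : isDdl q
      · have hd' : ddlPrefixes.any
            (fun prefix_ => PySem.Str.startswith (PySem.Str.strip q.1) prefix_) = true := by
          simpa [isDdl, ddlPrefixes] using hd
        simp only [hb', Bool.false_eq_true, if_false, hd', if_true, ih]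
        simp [List.filter, hb', hd]
      · have hd' : ddlPrefixes.any
            (fun prefix_ => PySem.Str.startswith (PySem.Str.strip q.1) prefix_) = false := by
          simpa [isDdl, ddlPrefixes] using hd
        simp only [hb', Bool.false_eq_true, if_false, hd', if_false, ih]
        simp [List.filter, hb', hd]

-- ===== VERDICT (by name: the statement is the Claim_ definition above) =====
theorem reorder_query_spec : Claim_equal_reorder_query := by
  intro queries _
  unfold Spec_reorder_query reorder_query reorder_query_alt
  rw [sorted_bool_key]
  simp only [reorder_loop queries [] []]
  simp
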